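-- pv_equiv track=rewrite | github.com/YOONLEEVERSE/REAL-algorithm | yjh/2024/12/28/solution3.py | solution
-- ===== SOURCE A (Python) =====
-- from itertools import combinations, product
-- from bisect import bisect_left
--
-- def solution(dice: list):
--     largest_wins = 0
--     answer_dices = []
--     dice_size = len(dice)
--     origin_indices = set(range(dice_size))
--
--     for indices in list(combinations(range(dice_size), dice_size // 2)):
--         a_dices, b_dices = ([dice[index] for index in indices], [dice[index] for index in origin_indices - set(indices)])
--         a_sums = [sum(p) for p in product(*a_dices)]
--         b_sums = sorted([sum(p) for p in product(*b_dices)])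
--         wins = sum([bisect_left(b_sums, a_sum) for a_sum in a_sums])
--         if largest_wins < wins:
--             largest_wins = wins
--             answer_dices = a_dices
--
--     return [dice.index(answer_dice) + 1 for answer_dice in answer_dices]
-- ===== SOURCE B (Python) =====
-- from itertools import combinations
-- from bisect import bisect_left
--
--
-- def _dist(group):
--     # distribution of sums over the cartesian product of the dice in `group`
--     d = {0: 1}
--     for die in group:
--         new = {}
--         for s, c in d.items():
--             for f in die:
--                 new[s + f] = new.get(s + f, 0) + c
--         d = new
--     return d
--
--
-- def solution(dice: list):
--     n = len(dice)
--     best_wins = 0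
--     best = ()
--     for comb in combinations(range(n), n // 2):
--         chosen = set(comb)
--         a_dist = _dist([dice[i] for i in comb])
--         b_dist = _dist([dice[i] for i in range(n) if i not in chosen])
--         b_keys = sorted(b_dist)
--         prefix = [0]
--         run = 0
--         for t in b_keys:
--             run += b_dist[t]
--             prefix.append(run)
--         wins = sum(c * prefix[bisect_left(b_keys, s)] for s, c in a_dist.items())
--         if best_wins < wins:
--             best_wins = wins
--             best = comb
--     return [i + 1 for i in best]
-- ===== Notes on version B (the rewrite author's own statement) =====
-- stated objective: alternative
-- what changed: Instead of enumerating every face tuple of each half (cartesian product) and binary-searching each A-sum in the sorted list of all B-sums, B convolves per-die face counts into a sum->count distribution dict for each half and counts wins from the two distributions via sorted distinct B-sums with running prefix counts.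
-- outside the precondition, e.g. on solution([[2, 0], [2, 0], [1, 3, -1], [2, 2, -3]]): A returns [1, 1], B returns [1, 2]
import Mathlib
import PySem

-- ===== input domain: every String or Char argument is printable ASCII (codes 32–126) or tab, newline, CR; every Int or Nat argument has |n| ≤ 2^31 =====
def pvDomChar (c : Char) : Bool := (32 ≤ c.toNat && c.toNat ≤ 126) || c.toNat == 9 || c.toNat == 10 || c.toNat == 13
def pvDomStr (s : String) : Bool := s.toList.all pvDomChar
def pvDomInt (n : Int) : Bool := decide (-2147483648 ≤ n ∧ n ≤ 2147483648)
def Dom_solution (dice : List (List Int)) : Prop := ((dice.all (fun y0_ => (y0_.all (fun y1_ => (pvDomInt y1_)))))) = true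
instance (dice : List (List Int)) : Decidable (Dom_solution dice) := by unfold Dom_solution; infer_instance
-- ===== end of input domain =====

-- B replaces A's per-tuple enumeration + binary search by per-half sum-distribution dicts
-- (face-count convolution) and prefix-count win counting; equivalence is proved on dice
-- lists without duplicate inner lists (Pre_).

-- ===== PORT A =====
-- [sum(p) for p in product(*group)] (itertools.product order: leftmost die outermost)
def prodSums : List (List Int) → List Int
  | [] => [0]
  | d :: rest => d.flatMap (fun f => (prodSums rest).map (fun s => f + s))

-- a_sums / b_sums / wins of one iteration of A's loop
def winsA (aD bD : List (List Int)) : Int :=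
  let aSums := prodSums aD
  let bSums := PySem.List.sorted (prodSums bD) (fun y => y) false
  (aSums.map (fun x => ((PySem.List.bisectLeft bSums x : Nat) : Int))).sum

-- one iteration of A's loop over `indices`.  dice[index] is always in range (indices come
-- from combinations(range(len(dice)))), so pyGetD is exact.  `origin_indices - set(indices)`
-- is iterated as a Python set; its order only feeds sums that are summed/sorted afterwards,
-- so the result is order-independent and PySem.Set.diff's order is exact for the result.
def stepA (dice : List (List Int)) (st : Int × List (List Int)) (indices : List Int) :
    Int × List (List Int) :=
  let aD := indices.map (fun i => PySem.List.pyGetD dice i [])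
  let bIdx := PySem.Set.diff (PySem.Set.ofList (PySem.List.pyRange 0 dice.length 1))
      (PySem.Set.ofList indices)
  let bD := bIdx.map (fun i => PySem.List.pyGetD dice i [])
  let wins := winsA aD bD
  if st.1 < wins then (wins, aD) else st

-- dice.index never raises here (every answer die is an element of dice), so getD 0 is exact
def solution (dice : List (List Int)) : List Int :=
  let combos := PySem.List.combinations (PySem.List.pyRange 0 dice.length 1) (dice.length / 2)
  let res := combos.foldl (stepA dice) (0, [])
  res.2.map (fun d => (((PySem.List.index? dice d).getD 0 : Nat) : Int) + 1)

-- ===== PORT B =====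
-- _dist: d = {0:1}; for die: new = {}; for s,c in d.items(): for f in die: new[s+f] = new.get(s+f,0)+c
def distConv (group : List (List Int)) : PySem.Dict Int Int :=
  group.foldl
    (fun d die => d.items.foldl
      (fun nd p => die.foldl
        (fun nd f => nd.insert (p.1 + f) (nd.getD (p.1 + f) 0 + p.2)) nd)
      PySem.Dict.empty)
    (PySem.Dict.mk [(0, 1)])

-- b_keys / prefix / wins of one iteration of B's loop.  b_dist[t] with t in b_keys never
-- raises, so getD is exact; prefix[bisect_left(...)] is always in range, so pyGetD is exact.
def winsB (aD bD : List (List Int)) : Int :=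
  let aDist := distConv aD
  let bDist := distConv bD
  let bKeys := PySem.List.sorted bDist.keys (fun y => y) false
  let pfx := (bKeys.foldl
      (fun pr t => (pr.1 ++ [pr.2 + bDist.getD t 0], pr.2 + bDist.getD t 0)) ([0], 0)).1
  (aDist.items.map
    (fun p => p.2 * PySem.List.pyGetD pfx ((PySem.List.bisectLeft bKeys p.1 : Nat) : Int) 0)).sum

def stepB (dice : List (List Int)) (st : Int × List Int) (comb : List Int) :
    Int × List Int :=
  let chosen := PySem.Set.ofList comb
  let aD := comb.map (fun i => PySem.List.pyGetD dice i [])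
  let bD := ((PySem.List.pyRange 0 dice.length 1).filter
      (fun i => !(PySem.Set.contains chosen i))).map (fun i => PySem.List.pyGetD dice i [])
  let wins := winsB aD bD
  if st.1 < wins then (wins, comb) else st

def solution_alt (dice : List (List Int)) : List Int :=
  let combos := PySem.List.combinations (PySem.List.pyRange 0 dice.length 1) (dice.length / 2)
  let res := combos.foldl (stepB dice) (0, [])
  res.2.map (fun i => i + 1)

-- ===== PRECONDITION & SPEC =====
-- Pre_ excludes dice lists containing duplicate dice (equal inner lists): A renumbers the
-- chosen dice through list.index first-match, so on duplicates its returned indices are an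
-- accidental first-vs-last artefact, while B returns the indices actually chosen.
def Pre_solution (dice : List (List Int)) : Prop := dice.Nodup
instance (dice : List (List Int)) : Decidable (Pre_solution dice) := by
  unfold Pre_solution; infer_instance
def pvWitness_solution : List (List Int) := [[1, 2], [3]]
def Spec_solution (dice : List (List Int)) (out : List Int) : Prop := out = solution_alt dice
instance (dice : List (List Int)) (out : List Int) : Decidable (Spec_solution dice out) := by
  unfold Spec_solution; infer_instance

-- ===== CLAIM (what is proved, stated in full; the proofs are below) =====
def Claim_equal_solution : Prop :=
  ∀ (dice : List (List Int)), Dom_solution dice → Pre_solution dice →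
    Spec_solution dice (solution dice)

-- ===== LEMMAS AND PROOFS =====
def wsum (l : List (Int × Int)) (h : Int → Int) : Int := (l.map (fun p => p.2 * h p.1)).sum

theorem wsum_cons (p : Int × Int) (l : List (Int × Int)) (h : Int → Int) :
    wsum (p :: l) h = p.2 * h p.1 + wsum l h := by simp [wsum]

theorem wsum_append (l m : List (Int × Int)) (h : Int → Int) :
    wsum (l ++ m) h = wsum l h + wsum m h := by simp [wsum]

theorem wsum_replace (k newv : Int) (h : Int → Int) :
    ∀ (l : List (Int × Int)) (q : Int × Int), (l.map Prod.fst).Nodup →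
    l.find? (fun p => p.1 == k) = some q →
    wsum (l.map (fun p => if p.1 == k then (k, newv) else p)) h
      = wsum l h - q.2 * h k + newv * h k := by
  intro l
  induction l with
  | nil => intro q _ hf; simp at hf
  | cons a t ih =>
      intro q hnd hf
      by_cases hak : a.1 = k
      · have hbeq : (a.1 == k) = true := by simp [hak]
        rw [List.find?_cons, hbeq] at hf
        have hq : q = a := by simpa using hf.symm
        subst hq
        have htid : t.map (fun p => if p.1 == k then (k, newv) else p) = t := by
          refine (List.map_congr_left ?_).trans (List.map_id t)
          intro p hp
          have hne : p.1 ≠ k := by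
            intro hpk
            exact (List.nodup_cons.mp hnd).1
              (by rw [hak, ← hpk]; exact List.mem_map.mpr ⟨p, hp, rfl⟩)
          simp [hne]
        simp only [List.map_cons, hbeq, if_true, htid]
        rw [wsum_cons, wsum_cons, hak]
        simp
        ring
      · have hbeq : (a.1 == k) = false := by simp [hak]
        rw [List.find?_cons, hbeq] at hf
        have := ih q (List.nodup_cons.mp hnd).2 hf
        simp only [List.map_cons, hbeq]
        rw [wsum_cons, wsum_cons, this]
        simp
        ring

theorem wsum_insert_add (d : PySem.Dict Int Int) (k w : Int) (h : Int → Int)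
    (hnd : d.keys.Nodup) :
    wsum (d.insert k (d.getD k 0 + w)).items h = wsum d.items h + w * h k := by
  have hnd' : (d.items.map Prod.fst).Nodup := by
    simpa [PySem.Dict.keys, Function.comp] using hnd
  by_cases hc : d.contains k = true
  · have hfind : (d.items.find? (fun p => p.1 == k)).isSome := by
      rw [List.find?_isSome]
      simpa [PySem.Dict.contains, List.any_eq_true] using hc
    obtain ⟨q, hq⟩ := Option.isSome_iff_exists.mp hfind
    have hget : d.getD k 0 = q.2 := by
      simp [PySem.Dict.getD, PySem.Dict.get?, hq]
    have hit : (d.insert k (d.getD k 0 + w)).items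
        = d.items.map (fun p => if p.1 == k then (k, d.getD k 0 + w) else p) := by
      simp [PySem.Dict.insert, hc]
    rw [hit, wsum_replace k (d.getD k 0 + w) h d.items q hnd' hq, hget]
    ring
  · have hg : d.getD k 0 = 0 := by
      have := (PySem.Dict.get?_eq_none_iff_contains d k).mpr (by simpa using hc)
      simp [PySem.Dict.getD, this]
    have hit : (d.insert k (d.getD k 0 + w)).items = d.items ++ [(k, d.getD k 0 + w)] := by
      simp [PySem.Dict.insert, hc]
    rw [hit, wsum_append, hg]
    simp [wsum]

theorem wsum_congr (l : List (Int × Int)) (h1 h2 : Int → Int) (hh : ∀ s, h1 s = h2 s) :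
    wsum l h1 = wsum l h2 := by
  simp only [wsum]
  congr 1
  exact List.map_congr_left (fun p _ => by rw [hh])

theorem wsum_inner (die : List Int) (s c : Int) (h : Int → Int) :
    ∀ (nd : PySem.Dict Int Int), nd.keys.Nodup →
    wsum (die.foldl (fun nd f => nd.insert (s + f) (nd.getD (s + f) 0 + c)) nd).items h
      = wsum nd.items h + c * (die.map (fun f => h (s + f))).sum := by
  induction die with
  | nil => intro nd _; simp
  | cons f t ih =>
      intro nd hnd
      simp only [List.foldl_cons, List.map_cons, List.sum_cons]
      rw [ih _ (PySem.Dict.nodup_keys_insert _ _ _ hnd), wsum_insert_add _ _ _ _ hnd]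
      ring

theorem nodup_inner (die : List Int) (s c : Int) (nd : PySem.Dict Int Int)
    (hnd : nd.keys.Nodup) :
    (die.foldl (fun nd f => nd.insert (s + f) (nd.getD (s + f) 0 + c)) nd).keys.Nodup := by
  exact PySem.Dict.nodup_keys_foldl_insert_key die (fun f => s + f)
    (fun d f => d.getD (s + f) 0 + c) nd hnd

theorem wsum_outer (die : List Int) (h : Int → Int) :
    ∀ (items : List (Int × Int)) (nd : PySem.Dict Int Int), nd.keys.Nodup →
    wsum (items.foldl (fun nd p => die.foldl
        (fun nd f => nd.insert (p.1 + f) (nd.getD (p.1 + f) 0 + p.2)) nd) nd).items h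
      = wsum nd.items h + wsum items (fun s => (die.map (fun f => h (s + f))).sum) := by
  intro items
  induction items with
  | nil => intro nd _; simp [wsum]
  | cons p t ih =>
      intro nd hnd
      simp only [List.foldl_cons]
      rw [ih _ (nodup_inner die p.1 p.2 nd hnd), wsum_inner die p.1 p.2 h nd hnd, wsum_cons]
      ring

theorem nodup_outer (die : List Int) (items : List (Int × Int)) (nd : PySem.Dict Int Int)
    (hnd : nd.keys.Nodup) :
    (items.foldl (fun nd p => die.foldl
        (fun nd f => nd.insert (p.1 + f) (nd.getD (p.1 + f) 0 + p.2)) nd) nd).keys.Nodup := by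
  induction items generalizing nd with
  | nil => exact hnd
  | cons p t ih => exact ih _ (nodup_inner die p.1 p.2 nd hnd)

theorem sum_map_prodSums_cons (die : List Int) (L : List (List Int)) (h : Int → Int) :
    ((prodSums (die :: L)).map h).sum
      = (die.map (fun f => ((prodSums L).map (fun x => h (f + x))).sum)).sum := by
  simp only [prodSums, List.flatMap_def, List.map_flatten, List.map_map, List.sum_flatten]
  congr 1
  apply List.map_congr_left
  intro f _
  simp only [Function.comp_apply, List.map_map]
  rfl

theorem wsum_distConv_gen (L : List (List Int)) :
    ∀ (d : PySem.Dict Int Int) (h : Int → Int), d.keys.Nodup →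
    wsum (L.foldl (fun d die => d.items.foldl
      (fun nd p => die.foldl
        (fun nd f => nd.insert (p.1 + f) (nd.getD (p.1 + f) 0 + p.2)) nd)
      PySem.Dict.empty) d).items h
      = wsum d.items (fun s => ((prodSums L).map (fun x => h (s + x))).sum) := by
  induction L with
  | nil =>
      intro d h _
      apply wsum_congr
      intro s
      simp [prodSums]
  | cons die L ih =>
      intro d h hnd
      simp only [List.foldl_cons]
      rw [ih _ h (nodup_outer die d.items PySem.Dict.empty (by simp [PySem.Dict.empty, PySem.Dict.keys]))]
      rw [wsum_outer die (fun s => ((prodSums L).map (fun x => h (s + x))).sum) d.items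
        PySem.Dict.empty (by simp [PySem.Dict.empty, PySem.Dict.keys])]
      have hz : wsum PySem.Dict.empty.items
          (fun s => ((prodSums L).map (fun x => h (s + x))).sum) = 0 := by
        simp [PySem.Dict.empty, wsum]
      rw [hz, zero_add]
      apply wsum_congr
      intro s
      rw [sum_map_prodSums_cons]
      congr 1
      apply List.map_congr_left
      intro f _
      congr 1
      apply List.map_congr_left
      intro x _
      ring_nf

theorem wsum_distConv (L : List (List Int)) (h : Int → Int) :
    wsum (distConv L).items h = ((prodSums L).map h).sum := by
  unfold distConv
  rw [wsum_distConv_gen L _ h (by simp [PySem.Dict.keys])]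
  simp [wsum]

theorem nodup_keys_distConv (L : List (List Int)) : (distConv L).keys.Nodup := by
  have aux : ∀ (M : List (List Int)) (d : PySem.Dict Int Int), d.keys.Nodup →
      (M.foldl (fun d die => d.items.foldl
        (fun nd p => die.foldl
          (fun nd f => nd.insert (p.1 + f) (nd.getD (p.1 + f) 0 + p.2)) nd)
        PySem.Dict.empty) d).keys.Nodup := by
    intro M
    induction M with
    | nil => intro d hd; exact hd
    | cons die M ih =>
        intro d hd
        exact ih _ (nodup_outer die d.items PySem.Dict.empty (by simp [PySem.Dict.empty, PySem.Dict.keys]))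
  exact aux L _ (by simp [PySem.Dict.keys])

theorem filter_eq_take_of_boundary (l : List Int) (x : Int) (k : Nat) (hk : k ≤ l.length)
    (h1 : ∀ (j : Nat) (hj : j < l.length), j < k → l[j] < x)
    (h2 : ∀ (j : Nat) (hj : j < l.length), k ≤ j → x ≤ l[j]) :
    l.filter (fun y => decide (y < x)) = l.take k := by
  conv_lhs => rw [← List.take_append_drop k l]
  rw [List.filter_append]
  have ht : (l.take k).filter (fun y => decide (y < x)) = l.take k := by
    apply List.filter_eq_self.mpr
    intro y hy
    obtain ⟨i, hi, hyi⟩ := List.mem_iff_getElem.mp hy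
    have hik : i < k := lt_of_lt_of_le hi (by simp)
    have hil : i < l.length := lt_of_lt_of_le hik hk
    have := h1 i hil hik
    simp only [List.getElem_take] at hyi
    subst hyi
    simpa using this
  have hd : (l.drop k).filter (fun y => decide (y < x)) = [] := by
    apply List.filter_eq_nil_iff.mpr
    intro y hy
    obtain ⟨i, hi, hyi⟩ := List.mem_iff_getElem.mp hy
    rw [List.getElem_drop] at hyi
    have hkl : k + i < l.length := by
      have := List.length_drop (l := l) (i := k)
      omega
    have := h2 (k + i) hkl (Nat.le_add_right _ _)
    subst hyi
    simpa using this
  rw [ht, hd, List.append_nil]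

theorem countP_eq_of_boundary (l : List Int) (x : Int) (k : Nat) (hk : k ≤ l.length)
    (h1 : ∀ (j : Nat) (hj : j < l.length), j < k → l[j] < x)
    (h2 : ∀ (j : Nat) (hj : j < l.length), k ≤ j → x ≤ l[j]) :
    l.countP (fun y => decide (y < x)) = k := by
  rw [List.countP_eq_length_filter, filter_eq_take_of_boundary l x k hk h1 h2,
    List.length_take, min_eq_left hk]

theorem bisectLeft_eq_countP (l : List Int) (x : Int)
    (hs : l.Pairwise (fun a b => a ≤ b)) :
    PySem.List.bisectLeft l x = l.countP (fun y => decide (y < x)) := by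
  obtain ⟨hle, h1, h2⟩ := PySem.List.bisectLeft_spec l x hs
  exact (countP_eq_of_boundary l x _ hle h1 h2).symm

def pscan (f : Int → Int) : Int → List Int → List Int
  | _, [] => []
  | r, t :: ks => (r + f t) :: pscan f (r + f t) ks

theorem foldl_scan (f : Int → Int) : ∀ (ks : List Int) (p : List Int) (r : Int),
    ks.foldl (fun pr t => (pr.1 ++ [pr.2 + f t], pr.2 + f t)) (p, r)
      = (p ++ pscan f r ks, ks.foldl (fun r t => r + f t) r) := by
  intro ks
  induction ks with
  | nil => intro p r; simp [pscan]
  | cons t ks ih =>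
      intro p r
      simp only [List.foldl_cons, ih, pscan, List.append_assoc, List.singleton_append]

theorem cons_pscan_getD (f : Int → Int) : ∀ (ks : List Int) (r : Int) (m : Nat),
    m ≤ ks.length →
    (r :: pscan f r ks).getD m 0 = r + ((ks.take m).map f).sum := by
  intro ks
  induction ks with
  | nil =>
      intro r m hm
      have : m = 0 := by simpa using hm
      subst this
      simp
  | cons t ks ih =>
      intro r m hm
      cases m with
      | zero => simp
      | succ m' =>
          simp only [pscan, List.getD_cons_succ, List.take_succ_cons, List.map_cons,
            List.sum_cons]
          rw [ih (r + f t) m' (by simpa using hm)]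
          ring

theorem find?_of_mem_nodup (p : Int × Int) :
    ∀ (l : List (Int × Int)), p ∈ l → (l.map (fun x => x.1)).Nodup →
    l.find? (fun q => q.1 == p.1) = some p := by
  intro l
  induction l with
  | nil => intro hmem _; simp at hmem
  | cons a t ih =>
      intro hmem hnd
      rcases List.mem_cons.mp hmem with rfl | hpt
      · rw [List.find?_cons, show (p.1 == p.1) = true by simp]
      · have hne : (a.1 == p.1) = false := by
          simp only [beq_eq_false_iff_ne, ne_eq]
          intro hap
          exact (List.nodup_cons.mp hnd).1
            (by show a.1 ∈ _; rw [hap]; exact List.mem_map.mpr ⟨p, hpt, rfl⟩)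
        rw [List.find?_cons, hne]
        exact ih hpt (List.nodup_cons.mp hnd).2

theorem getD_of_mem_items (d : PySem.Dict Int Int) (p : Int × Int)
    (hmem : p ∈ d.items) (hnd : d.keys.Nodup) : d.getD p.1 0 = p.2 := by
  simp [PySem.Dict.getD, PySem.Dict.get?, find?_of_mem_nodup p d.items hmem hnd]

theorem sum_map_ite_filter (l : List (Int × Int)) (q : Int × Int → Bool)
    (g : Int × Int → Int) :
    (l.map (fun p => if q p then g p else 0)).sum = ((l.filter q).map g).sum := by
  induction l with
  | nil => simp
  | cons a t ih =>
      by_cases ha : q a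
      · simp [ha, ih]
      · simp [ha, ih]

theorem prefix_val_dict (d : PySem.Dict Int Int) (hnd : d.keys.Nodup) (s : Int) :
    PySem.List.pyGetD
      (((PySem.List.sorted d.keys (fun y => y) false).foldl
        (fun pr t => (pr.1 ++ [pr.2 + d.getD t 0], pr.2 + d.getD t 0)) ([0], 0)).1)
      ((((PySem.List.bisectLeft (PySem.List.sorted d.keys (fun y => y) false) s) : Nat) : Int)) 0
      = wsum d.items (fun t => if t < s then 1 else 0) := by
  have hpair : (PySem.List.sorted d.keys (fun y => y) false).Pairwise (fun a b => a ≤ b) := by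
    simpa using PySem.List.sorted_pairwise d.keys (fun y => y)
  obtain ⟨hk, h1, h2⟩ :=
    PySem.List.bisectLeft_spec (PySem.List.sorted d.keys (fun y => y) false) s hpair
  rw [foldl_scan (fun t => d.getD t 0)]
  simp only [PySem.List.pyGetD_natCast, List.singleton_append]
  rw [cons_pscan_getD (fun t => d.getD t 0) _ 0 _ hk, zero_add]
  rw [← filter_eq_take_of_boundary _ s _ hk h1 h2]
  have hperm : ((PySem.List.sorted d.keys (fun y => y) false).filter
      (fun y => decide (y < s))).Perm (d.keys.filter (fun y => decide (y < s))) :=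
    (PySem.List.sorted_perm d.keys (fun y => y) false).filter _
  rw [(hperm.map (fun t => d.getD t 0)).sum_eq]
  have hkeys : d.keys = d.items.map (fun x => x.1) := rfl
  rw [hkeys, List.filter_map, List.map_map]
  have hcg : (d.items.filter ((fun y => decide (y < s)) ∘ fun x => x.1)).map
        ((fun t => d.getD t 0) ∘ fun x => x.1)
      = (d.items.filter ((fun y => decide (y < s)) ∘ fun x => x.1)).map (fun p => p.2) := by
    apply List.map_congr_left
    intro p hp
    exact getD_of_mem_items d p (List.mem_of_mem_filter hp) hnd
  rw [hcg]
  rw [wsum, ← sum_map_ite_filter d.items ((fun y => decide (y < s)) ∘ fun x => x.1) (fun p => p.2)]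
  congr 1
  apply List.map_congr_left
  intro p _
  by_cases hps : p.1 < s <;> simp [hps]

theorem wins_eq (aD bD : List (List Int)) : winsA aD bD = winsB aD bD := by
  unfold winsA winsB
  have hA : ∀ x : Int,
      ((PySem.List.bisectLeft (PySem.List.sorted (prodSums bD) (fun y => y) false) x : Nat) : Int)
        = ((prodSums bD).countP (fun y => decide (y < x)) : Int) := by
    intro x
    rw [bisectLeft_eq_countP _ x (by simpa using PySem.List.sorted_pairwise (prodSums bD) (fun y => y))]
    rw [(PySem.List.sorted_perm (prodSums bD) (fun y => y) false).countP_eq]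
  have hB : ∀ x : Int,
      PySem.List.pyGetD
        (((PySem.List.sorted (distConv bD).keys (fun y => y) false).foldl
          (fun pr t => (pr.1 ++ [pr.2 + (distConv bD).getD t 0], pr.2 + (distConv bD).getD t 0))
          ([0], 0)).1)
        ((((PySem.List.bisectLeft (PySem.List.sorted (distConv bD).keys (fun y => y) false) x) : Nat) : Int)) 0
        = ((prodSums bD).countP (fun y => decide (y < x)) : Int) := by
    intro x
    rw [prefix_val_dict (distConv bD) (nodup_keys_distConv bD) x]
    rw [wsum_distConv bD (fun t => if t < x then 1 else 0)]
    rw [show (fun t => if t < x then (1 : Int) else 0)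
        = (fun t => if (fun y => decide (y < x)) t = true then (1 : Int) else 0) by
      funext t; by_cases h : t < x <;> simp [h]]
    exact PySem.List.sum_map_ite_one_zero (fun y => decide (y < x)) (prodSums bD)
  set H := fun x : Int =>
    PySem.List.pyGetD
      (((PySem.List.sorted (distConv bD).keys (fun y => y) false).foldl
        (fun pr t => (pr.1 ++ [pr.2 + (distConv bD).getD t 0], pr.2 + (distConv bD).getD t 0))
        ([0], 0)).1)
      ((((PySem.List.bisectLeft (PySem.List.sorted (distConv bD).keys (fun y => y) false) x) : Nat) : Int)) 0

  calc (List.map (fun x => ((PySem.List.bisectLeft (PySem.List.sorted (prodSums bD) (fun y => y) false) x : Nat) : Int)) (prodSums aD)).sum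
      = (List.map (fun x => ((prodSums bD).countP (fun y => decide (y < x)) : Int)) (prodSums aD)).sum := by
        congr 1; exact List.map_congr_left (fun x _ => hA x)
    _ = ((prodSums aD).map H).sum := by
        congr 1; exact List.map_congr_left (fun x _ => (hB x).symm)
    _ = wsum (distConv aD).items H := (wsum_distConv aD H).symm
    _ = _ := rfl

theorem foldl_rel {α β γ : Type} (R : α → β → Prop) (f : α → γ → α) (g : β → γ → β)
    (l : List γ) (a : α) (b : β) (h0 : R a b)
    (hstep : ∀ a b c, c ∈ l → R a b → R (f a c) (g b c)) :
    R (l.foldl f a) (l.foldl g b) := by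
  induction l generalizing a b with
  | nil => exact h0
  | cons c t ih =>
      exact ih (f a c) (g b c) (hstep a b c (List.mem_cons_self) h0)
        (fun a b c hc => hstep a b c (List.mem_cons_of_mem _ hc))

theorem index?_getElem_of_nodup (l : List (List Int)) (m : Nat) (h : m < l.length)
    (hnd : l.Nodup) : PySem.List.index? l l[m] = some m := by
  rw [PySem.List.index?_eq_idxOf?, List.idxOf?_eq_some_iff]
  refine ⟨h, rfl, ?_⟩
  intro j hj hje
  exact absurd ((List.Nodup.getElem_inj_iff hnd).mp hje) (by omega)

theorem step_rel (dice : List (List Int)) (combos : List (List Int))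
    (a : Int × List (List Int)) (b : Int × List Int) (c : List Int) (hc : c ∈ combos)
    (h : a.1 = b.1 ∧ a.2 = b.2.map (fun i => PySem.List.pyGetD dice i [])
      ∧ (b.2 = [] ∨ b.2 ∈ combos)) :
    (stepA dice a c).1 = (stepB dice b c).1
      ∧ (stepA dice a c).2 = (stepB dice b c).2.map (fun i => PySem.List.pyGetD dice i [])
      ∧ ((stepB dice b c).2 = [] ∨ (stepB dice b c).2 ∈ combos) := by
  obtain ⟨h1, h2, h3⟩ := h
  unfold stepA stepB
  dsimp only
  have hset : PySem.Set.diff (PySem.Set.ofList (PySem.List.pyRange 0 dice.length 1))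
      (PySem.Set.ofList c)
      = (PySem.List.pyRange 0 dice.length 1).filter
        (fun i => !(PySem.Set.contains (PySem.Set.ofList c) i)) := by
    rw [PySem.Set.diff, PySem.Set.ofList_eq_self_of_nodup _ (PySem.List.nodup_pyRange_one 0 dice.length)]
  rw [hset, wins_eq, h1]
  by_cases hw : b.1 < winsB (c.map (fun i => PySem.List.pyGetD dice i []))
      (((PySem.List.pyRange 0 dice.length 1).filter
        (fun i => !(PySem.Set.contains (PySem.Set.ofList c) i))).map
          (fun i => PySem.List.pyGetD dice i []))
  · simp only [if_pos hw]
    exact ⟨trivial, trivial, Or.inr hc⟩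
  · simp only [if_neg hw]
    exact ⟨h1, h2, h3⟩

theorem main_eq (dice : List (List Int)) (hnd : dice.Nodup) :
    solution dice = solution_alt dice := by
  unfold solution solution_alt
  dsimp only
  have key := foldl_rel
    (fun (a : Int × List (List Int)) (b : Int × List Int) =>
      a.1 = b.1 ∧ a.2 = b.2.map (fun i => PySem.List.pyGetD dice i [])
        ∧ (b.2 = [] ∨ b.2 ∈ PySem.List.combinations (PySem.List.pyRange 0 dice.length 1) (dice.length / 2)))
    (stepA dice) (stepB dice)
    (PySem.List.combinations (PySem.List.pyRange 0 dice.length 1) (dice.length / 2))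
    (0, []) (0, []) ⟨rfl, by simp, Or.inl rfl⟩
    (fun a b c hc h => step_rel dice _ a b c hc h)
  obtain ⟨h1, h2, h3⟩ := key
  rw [h2, List.map_map]
  apply List.map_congr_left
  intro i hi
  have hmem : i ∈ PySem.List.pyRange 0 dice.length 1 := by
    rcases h3 with hnil | hcm
    · rw [hnil] at hi; simp at hi
    · exact (PySem.List.sublist_of_mem_combinations hcm).subset hi
  have hrange := (PySem.List.mem_pyRange_iff_of_pos (by norm_num) i).mp hmem
  have h0i : 0 ≤ i := hrange.1
  have hin : i < dice.length := by exact_mod_cast hrange.2.1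
  have hm : i.toNat < dice.length := by omega
  have hcast : ((i.toNat : Nat) : Int) = i := Int.toNat_of_nonneg h0i
  simp only [Function.comp_apply]
  rw [← hcast, PySem.List.pyGetD_natCast, List.getD_eq_getElem dice [] hm,
    index?_getElem_of_nodup dice i.toNat hm hnd]
  simp

-- ===== VERDICT (by name: the statement is the Claim_ definition above) =====
theorem solution_spec : Claim_equal_solution := by
  intro dice _ hpre
  unfold Pre_solution at hpre
  unfold Spec_solution
  exact main_eq dice hpre
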